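-- pv_equiv track=rewrite | github.com/Ahmed-Abouzeid/MMSS | utils.py | get_user_adjacency
-- ===== SOURCE A (Python) =====
-- def get_user_adjacency(adjacency_matrix):
--     """helper function to retrieve the adjacent users for each user"""
--
--     adjacents = {}
--     for user_index in range(len(adjacency_matrix)):
--         adjacent_users = set()
--         for e, col in enumerate(adjacency_matrix[user_index]):
--             if adjacency_matrix[user_index][e] > 0:
--                 adjacent_users.add(e)
--
--         for e, row in enumerate(adjacency_matrix):
--             for e_col, col in enumerate(row):
--                 if e_col == user_index:
--                     if row[user_index] > 0:
--                         adjacent_users.add(e)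
--         adjacents.update({user_index: adjacent_users})
--
--     return adjacents
-- ===== SOURCE B (Python) =====
-- def get_user_adjacency(adjacency_matrix):
--     """helper function to retrieve the adjacent users for each user"""
--
--     adjacents = {}
--     for i, row in enumerate(adjacency_matrix):
--         neighbors = {j for j, v in enumerate(row) if v > 0}
--         for e, other in enumerate(adjacency_matrix):
--             if len(other) > i and other[i] > 0:
--                 neighbors.add(e)
--         adjacents[i] = neighbors
--     return adjacents
-- ===== Notes on version B (the rewrite author's own statement) =====
-- stated objective: faster
-- what changed: B drops A's innermost per-row scan that searches for the column index equal to user_index and replaces it with a direct length-guarded index test (other[i] > 0), and builds the row-neighbor set with a comprehension, turning three nested loops into a double loop.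
import Mathlib
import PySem

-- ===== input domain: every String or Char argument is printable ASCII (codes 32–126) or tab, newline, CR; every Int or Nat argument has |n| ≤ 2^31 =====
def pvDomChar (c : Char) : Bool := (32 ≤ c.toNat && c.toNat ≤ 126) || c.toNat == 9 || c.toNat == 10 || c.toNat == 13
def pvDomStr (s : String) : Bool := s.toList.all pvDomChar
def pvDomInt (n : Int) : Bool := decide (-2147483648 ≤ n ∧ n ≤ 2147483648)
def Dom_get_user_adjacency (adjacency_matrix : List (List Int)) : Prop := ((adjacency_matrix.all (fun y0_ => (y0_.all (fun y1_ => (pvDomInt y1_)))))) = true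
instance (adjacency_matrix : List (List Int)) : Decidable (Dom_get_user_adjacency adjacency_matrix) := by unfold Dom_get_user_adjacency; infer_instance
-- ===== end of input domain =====

-- B replaces A's innermost scan (which searches each row for the column equal to user_index)
-- by a direct length-guarded index test, one double loop instead of three nested ones; objective: faster.

-- ===== PORT A =====
-- adjacency_matrix[user_index] is always in range (user_index ∈ range(len)), so pyGetD is exact;
-- likewise adjacency_matrix[user_index][e] and row[user_index] (only read when e_col == user_index exists).
def get_user_adjacency (adjacency_matrix : List (List Int)) : List (Int × List Int) :=
  ((PySem.List.pyRange 0 (adjacency_matrix.length : Int) 1).foldl (fun adjacents user_index =>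
    let row := PySem.List.pyGetD adjacency_matrix user_index []
    let adjacent_users : PySem.Set Int :=
      (PySem.List.enumerate row).foldl (fun s ec =>
        if PySem.List.pyGetD row ec.1 0 > 0 then PySem.Set.add s ec.1 else s) PySem.Set.empty
    let adjacent_users2 : PySem.Set Int :=
      (PySem.List.enumerate adjacency_matrix).foldl (fun s er =>
        (PySem.List.enumerate er.2).foldl (fun s ecol =>
          if ecol.1 == user_index then
            (if PySem.List.pyGetD er.2 user_index 0 > 0 then PySem.Set.add s er.1 else s)
          else s) s) adjacent_users
    -- adjacents.update({user_index: adjacent_users}) = insert of the single key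
    PySem.Dict.insert adjacents user_index adjacent_users2) PySem.Dict.empty).items

-- ===== PORT B =====
def get_user_adjacency_alt (adjacency_matrix : List (List Int)) : List (Int × List Int) :=
  ((PySem.List.enumerate adjacency_matrix).foldl (fun adjacents p =>
    let neighbors : PySem.Set Int :=
      PySem.Set.ofList (((PySem.List.enumerate p.2).filter (fun jv => decide (jv.2 > 0))).map (fun jv => jv.1))
    let neighbors2 : PySem.Set Int :=
      (PySem.List.enumerate adjacency_matrix).foldl (fun s eo =>
        if p.1 < (eo.2.length : Int) then
          (if PySem.List.pyGetD eo.2 p.1 0 > 0 then PySem.Set.add s eo.1 else s)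
        else s) neighbors
    PySem.Dict.insert adjacents p.1 neighbors2) PySem.Dict.empty).items

-- ===== PRECONDITION & SPEC =====
def Spec_get_user_adjacency (adjacency_matrix : List (List Int)) (out : List (Int × List Int)) : Prop := out = get_user_adjacency_alt adjacency_matrix
instance (adjacency_matrix : List (List Int)) (out : List (Int × List Int)) : Decidable (Spec_get_user_adjacency adjacency_matrix out) := by unfold Spec_get_user_adjacency; infer_instance

-- ===== CLAIM (what is proved, stated in full; the proofs are below) =====
def Claim_equal_get_user_adjacency : Prop := ∀ (adjacency_matrix : List (List Int)), Dom_get_user_adjacency adjacency_matrix → Spec_get_user_adjacency adjacency_matrix (get_user_adjacency adjacency_matrix)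

-- ===== LEMMAS AND PROOFS =====

-- a fold over enumerate(m) is a fold over range(len(m)) reading m[j]
lemma pv_foldl_enumerate_eq_pyRange {α β : Type} (m : List α) (d : α) (f : β → Int × α → β) (init : β) :
    (PySem.List.enumerate m).foldl f init
      = (PySem.List.pyRange 0 (m.length : Int) 1).foldl
          (fun b j => f b (j, PySem.List.pyGetD m j d)) init := by
  rw [PySem.List.enumerate_eq_map_pyRange m d, List.foldl_map]
  simp [PySem.List.len]

-- on a pair of enumerate(r), indexing r at the first component yields the second
lemma pv_pyGetD_enum (r : List Int) (p : Int × Int) (hp : p ∈ PySem.List.enumerate r 0) :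
    PySem.List.pyGetD r p.1 0 = p.2 := by
  rcases (PySem.List.mem_enumerate_iff r 0 p).mp hp with ⟨k, hk, rfl⟩
  simp [PySem.List.pyGetD_natCast, hk]

-- a set comprehension {f x for x in l if p x} as a guarded fold
lemma pv_foldl_add_filter_map {α : Type} (p : α → Bool) (f : α → Int) (l : List α)
    (s : PySem.Set Int) :
    ((l.filter p).map f).foldl PySem.Set.add s
      = l.foldl (fun s x => if p x then PySem.Set.add s (f x) else s) s := by
  induction l generalizing s with
  | nil => rfl
  | cons a l ih =>
    by_cases h : p a <;> simp [h, ih]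

-- A's inner scan for the unique index equal to i collapses to a bounds test
lemma pv_foldl_key_hit {α : Type} (i : Int) (g : PySem.Set Int → PySem.Set Int) (r : List α)
    (s0 : Int) (s : PySem.Set Int) :
    (PySem.List.enumerate r s0).foldl (fun s p => if p.1 == i then g s else s) s
      = if s0 ≤ i ∧ i < s0 + (r.length : Int) then g s else s := by
  induction r generalizing s0 s with
  | nil =>
    rw [PySem.List.enumerate_nil]
    simp only [List.foldl_nil, List.length_nil]
    rw [if_neg (by omega)]
  | cons a r ih =>
    rw [PySem.List.enumerate_cons]
    simp only [List.foldl_cons, List.length_cons]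
    by_cases h : s0 = i
    · simp only [h, BEq.rfl, if_true]
      rw [ih, if_neg (by omega), if_pos (by omega)]
    · rw [if_neg (by simpa using h), ih]
      have hc : (s0 + 1 ≤ i ∧ i < s0 + 1 + (r.length : Int))
          ↔ (s0 ≤ i ∧ i < s0 + ((r.length : Nat) + 1 : Int)) := by omega
      split_ifs with h1 h2 h2 <;> first | rfl | (exact absurd (hc.mp h1) h2) | (exact absurd (hc.mpr h2) h1)

-- for 0 ≤ j the two per-user neighbor sets coincide
lemma pv_sets_eq (m : List (List Int)) (j : Int) (hj : 0 ≤ j) (r : List Int) :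
    (PySem.List.enumerate m).foldl (fun s er =>
        (PySem.List.enumerate er.2).foldl (fun s ecol =>
          if ecol.1 == j then
            (if PySem.List.pyGetD er.2 j 0 > 0 then PySem.Set.add s er.1 else s)
          else s) s)
      ((PySem.List.enumerate r).foldl (fun s ec =>
          if PySem.List.pyGetD r ec.1 0 > 0 then PySem.Set.add s ec.1 else s) PySem.Set.empty)
    = (PySem.List.enumerate m).foldl (fun s eo =>
        if j < (eo.2.length : Int) then
          (if PySem.List.pyGetD eo.2 j 0 > 0 then PySem.Set.add s eo.1 else s)
        else s)
      (PySem.Set.ofList (((PySem.List.enumerate r).filter (fun jv => decide (jv.2 > 0))).map (fun jv => jv.1))) := by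
  have hrow : (PySem.List.enumerate r).foldl (fun s ec =>
      if PySem.List.pyGetD r ec.1 0 > 0 then PySem.Set.add s ec.1 else s) PySem.Set.empty
    = PySem.Set.ofList (((PySem.List.enumerate r).filter (fun jv => decide (jv.2 > 0))).map (fun jv => jv.1)) := by
    rw [PySem.Set.ofList_eq_foldl, pv_foldl_add_filter_map]
    refine (PySem.List.foldl_congr_mem' _ _ _ _ ?_).symm
    intro x hx acc
    rw [pv_pyGetD_enum r x hx]
    simp
  rw [hrow]
  refine PySem.List.foldl_congr_mem' _ _ _ _ ?_
  intro er _ acc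
  rw [pv_foldl_key_hit]
  have hc : (0 ≤ j ∧ j < 0 + (er.2.length : Int)) ↔ (j < (er.2.length : Int)) := by omega
  rw [if_congr hc rfl rfl]

-- ===== VERDICT (by name: the statement is the Claim_ definition above) =====
theorem get_user_adjacency_spec : Claim_equal_get_user_adjacency := by
  intro m _
  unfold Spec_get_user_adjacency get_user_adjacency get_user_adjacency_alt
  rw [pv_foldl_enumerate_eq_pyRange m ([] : List Int)]
  congr 1
  refine PySem.List.foldl_congr_mem' _ _ _ _ ?_
  intro j hj acc
  have hj0 : 0 ≤ j := (PySem.List.mem_pyRange_one.mp hj).1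
  dsimp only
  rw [pv_sets_eq m j hj0 (PySem.List.pyGetD m j [])]
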